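-- pv_equiv track=rewrite | github.com/MouraYuri/Simplex | venv/src/main.py | buildingInitialVectorX
-- ===== SOURCE A (Python) =====
-- def createMatrix(d):
-- 	m = []
-- 	for x in range(d):
-- 		m.append([0])
-- 	return m
--
-- def buildingInitialVectorX(n, XB, AB):
--     ctrl = createMatrix(n)
--
--     #for z in range(n):
--     #    ctrl.append([0])
--
--     counter = 0
--     for y in range(n):
--         for q in AB:
--             if (y+1 == q):
--                 ctrl[y][0] = XB[counter][0]
--                 counter = counter + 1
--                 break
--             else:
--                 ctrl[y][0] = 0
--     return ctrl
-- ===== SOURCE B (Python) =====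
-- def buildingInitialVectorX(n, XB, AB):
--     result = [[0] for _ in range(n)]
--     positions = sorted(p for p in set(AB) if 1 <= p <= n)
--     for i, p in enumerate(positions):
--         result[p - 1][0] = XB[i][0]
--     return result
-- ===== Notes on version B (the rewrite author's own statement) =====
-- stated objective: idiomatic
-- what changed: Instead of scanning every index 0..n-1 and re-scanning AB with a break at each index, B builds the sorted distinct valid positions of AB once and scatters the XB values over them into a pre-built zero matrix, iterating only over the selected positions.
import Mathlib
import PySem

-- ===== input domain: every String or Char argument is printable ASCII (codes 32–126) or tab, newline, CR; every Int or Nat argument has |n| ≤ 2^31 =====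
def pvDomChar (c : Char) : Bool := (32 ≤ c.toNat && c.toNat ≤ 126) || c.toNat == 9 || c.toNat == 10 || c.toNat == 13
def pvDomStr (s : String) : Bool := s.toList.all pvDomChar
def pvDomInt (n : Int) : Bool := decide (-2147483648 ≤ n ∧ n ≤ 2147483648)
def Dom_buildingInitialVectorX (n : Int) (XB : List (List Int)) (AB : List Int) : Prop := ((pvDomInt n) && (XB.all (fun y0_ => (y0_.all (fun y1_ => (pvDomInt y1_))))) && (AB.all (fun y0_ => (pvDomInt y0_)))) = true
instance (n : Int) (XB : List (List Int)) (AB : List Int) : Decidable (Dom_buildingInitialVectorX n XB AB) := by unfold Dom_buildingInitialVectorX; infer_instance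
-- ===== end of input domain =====

-- B replaces A's scan of every index 0..n-1 with an inner scan of AB by a single scatter of XB
-- over the sorted distinct valid positions of AB into a zero matrix (alternative/idiomatic).

-- ===== PORT A =====
-- XB[c][0]; the Options default where Python would raise IndexError (those inputs are outside Pre_)
def pvXbValA (XB : List (List Int)) (c : Int) : Int :=
  (PySem.List.pyGet? ((PySem.List.pyGet? XB c).getD []) 0).getD 0

def createMatrixL (d : Int) : List (List Int) :=
  (PySem.List.pyRange 0 d 1).foldl (fun m _ => m ++ [[0]]) []

-- ctrl[y][0] = v  (the index is always in range when A executes this)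
def pvSetRow0 (ctrl : List (List Int)) (y : Nat) (v : Int) : List (List Int) :=
  ctrl.set y ((ctrl.getD y []).set 0 v)

-- the inner 'for q in AB' loop with its break, over the state (ctrl, counter)
def pvInnerA (XB : List (List Int)) (y : Int) :
    List Int → List (List Int) × Int → List (List Int) × Int
  | [], st => st
  | q :: rest, (ctrl, counter) =>
    if y + 1 = q then (pvSetRow0 ctrl y.toNat (pvXbValA XB counter), counter + 1)
    else pvInnerA XB y rest (pvSetRow0 ctrl y.toNat 0, counter)

def buildingInitialVectorX (n : Int) (XB : List (List Int)) (AB : List Int) : List (List Int) :=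
  ((PySem.List.pyRange 0 n 1).foldl (fun st y => pvInnerA XB y AB st) (createMatrixL n, 0)).1

-- ===== PORT B =====
def pvXbValB (XB : List (List Int)) (c : Int) : Int :=
  (PySem.List.pyGet? ((PySem.List.pyGet? XB c).getD []) 0).getD 0

def buildingInitialVectorX_alt (n : Int) (XB : List (List Int)) (AB : List Int) : List (List Int) :=
  let result := (PySem.List.pyRange 0 n 1).map (fun _ => ([0] : List Int))
  let positions := PySem.List.sorted
      ((PySem.Set.ofList AB).filter (fun p => decide (1 ≤ p) && decide (p ≤ n))) (fun x => x) false
  (PySem.List.enumerate positions 0).foldl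
    (fun res ip => pvSetRow0 res (ip.2 - 1).toNat (pvXbValB XB ip.1)) result

-- ===== PRECONDITION & SPEC =====
-- number of distinct AB values in [1, n] (= how many XB rows A consumes)
def pvNeed (n : Int) (AB : List Int) : Nat :=
  ((PySem.Set.ofList AB).filter (fun p => decide (1 ≤ p) && decide (p ≤ n))).length

-- Pre_ excludes exactly the inputs on which the Python A raises IndexError (XB exhausted, or an
-- empty XB row reached); B raises on the same inputs.
def Pre_buildingInitialVectorX (n : Int) (XB : List (List Int)) (AB : List Int) : Prop :=
  pvNeed n AB ≤ XB.length ∧ ∀ row ∈ XB.take (pvNeed n AB), row ≠ []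
instance (n : Int) (XB : List (List Int)) (AB : List Int) : Decidable (Pre_buildingInitialVectorX n XB AB) := by unfold Pre_buildingInitialVectorX; infer_instance

def pvWitness_buildingInitialVectorX : Int × List (List Int) × List Int := (2, [[5]], [1])

def Spec_buildingInitialVectorX (n : Int) (XB : List (List Int)) (AB : List Int) (out : List (List Int)) : Prop := out = buildingInitialVectorX_alt n XB AB
instance (n : Int) (XB : List (List Int)) (AB : List Int) (out : List (List Int)) : Decidable (Spec_buildingInitialVectorX n XB AB out) := by unfold Spec_buildingInitialVectorX; infer_instance

-- ===== CLAIM (what is proved, stated in full; the proofs are below) =====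
def Claim_equal_buildingInitialVectorX : Prop := ∀ (n : Int) (XB : List (List Int)) (AB : List Int), Dom_buildingInitialVectorX n XB AB → Pre_buildingInitialVectorX n XB AB → Spec_buildingInitialVectorX n XB AB (buildingInitialVectorX n XB AB)

-- ===== LEMMAS AND PROOFS =====

-- number of indices y in range(m) with y+1 ∈ AB (= pvNeed, but indexed by the loop variable)
def pvCnt (AB : List Int) (m : Nat) : Nat :=
  ((List.range m).filter (fun (y : Nat) => decide (((y : Int) + 1) ∈ AB))).length

-- the common value: entry y is [XB[cnt y][0]] when y+1 ∈ AB, else [0]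
def pvSpec (XB : List (List Int)) (AB : List Int) (m : Nat) : List (List Int) :=
  (List.range m).map (fun (y : Nat) =>
    if ((y : Int) + 1) ∈ AB then [pvXbValA XB ((pvCnt AB y : Nat) : Int)] else [0])

-- the sorted distinct valid positions, named: strictly increasing successors of matching indices
def pvPos (AB : List Int) (m : Nat) : List Int :=
  ((List.range m).filter (fun (y : Nat) => decide (((y : Int) + 1) ∈ AB))).map (fun (y : Nat) => (y : Int) + 1)

theorem pvXbVal_eq : pvXbValB = pvXbValA := rfl

theorem pvSetRow0_length (c : List (List Int)) (j : Nat) (v : Int) :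
    (pvSetRow0 c j v).length = c.length := by
  simp [pvSetRow0]

theorem pvSetRow0_append (c tl : List (List Int)) (j : Nat) (v : Int) (h : j < c.length) :
    pvSetRow0 (c ++ tl) j v = pvSetRow0 c j v ++ tl := by
  simp [pvSetRow0, List.getD_eq_getElem?_getD, List.getElem?_append_left h,
    List.set_append_left _ _ h]

theorem pvSetRow0_last (l : List (List Int)) (v : Int) :
    pvSetRow0 (l ++ [[0]]) l.length v = l ++ [[v]] := by
  simp [pvSetRow0, List.getD_eq_getElem?_getD,
    List.set_append_right _ _ (le_refl l.length)]

theorem pvSetRow0_self (c : List (List Int)) (j : Nat) (h : getElem? c j = some [0]) :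
    pvSetRow0 c j 0 = c := by
  obtain ⟨hj, hv⟩ := List.getElem?_eq_some_iff.mp h
  rw [pvSetRow0, List.getD_eq_getElem?_getD, h]
  show c.set j (([0] : List Int).set 0 0) = c
  have h0 : (([0] : List Int).set 0 0) = [0] := rfl
  rw [h0, ← hv, List.set_getElem_self]

theorem pvInnerA_length (XB : List (List Int)) (y : Int) (AB : List Int)
    (c : List (List Int)) (t : Int) :
    (pvInnerA XB y AB (c, t)).1.length = c.length := by
  induction AB generalizing c t with
  | nil => simp [pvInnerA]
  | cons q rest ih =>
    by_cases hq : y + 1 = q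
    · simp [pvInnerA, hq, pvSetRow0_length]
    · rw [pvInnerA, if_neg hq, ih, pvSetRow0_length]

theorem pvInnerA_append (XB : List (List Int)) (y : Int) (AB : List Int)
    (c tl : List (List Int)) (t : Int) (h : y.toNat < c.length) :
    pvInnerA XB y AB (c ++ tl, t) =
      ((pvInnerA XB y AB (c, t)).1 ++ tl, (pvInnerA XB y AB (c, t)).2) := by
  induction AB generalizing c t with
  | nil => simp [pvInnerA]
  | cons q rest ih =>
    by_cases hq : y + 1 = q
    · simp [pvInnerA, hq, pvSetRow0_append _ _ _ _ h]
    · rw [pvInnerA, if_neg hq, pvSetRow0_append _ _ _ _ h,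
        ih _ _ (by rw [pvSetRow0_length]; exact h)]
      rw [pvInnerA, if_neg hq]

theorem pvInnerA_spec (XB : List (List Int)) (y : Int) (AB : List Int)
    (c : List (List Int)) (t : Int) (h : getElem? c y.toNat = some [0]) :
    pvInnerA XB y AB (c, t) =
      if (y + 1) ∈ AB then (c.set y.toNat [pvXbValA XB t], t + 1) else (c, t) := by
  induction AB generalizing t with
  | nil => simp [pvInnerA]
  | cons q rest ih =>
    by_cases hq : y + 1 = q
    · have hgd : c.getD y.toNat [] = [0] := by
        rw [List.getD_eq_getElem?_getD, h]; rfl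
      rw [pvInnerA, if_pos hq, if_pos (List.mem_cons.mpr (Or.inl hq))]
      rw [pvSetRow0, hgd]
      rfl
    · rw [pvInnerA, if_neg hq, pvSetRow0_self c _ h, ih]
      by_cases hm : (y + 1) ∈ rest <;> simp [List.mem_cons, hq, hm]

theorem createMatrixL_eq (m : Nat) : createMatrixL (m : Int) = List.replicate m [0] := by
  induction m with
  | zero => simp [createMatrixL, PySem.List.pyRange_one_eq_nil le_rfl]
  | succ k ih =>
    have h1 : ((k + 1 : Nat) : Int) = (k : Int) + 1 := by push_cast; ring
    rw [createMatrixL, h1, PySem.List.pyRange_one_succ_right (Int.natCast_nonneg k),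
      List.foldl_append]
    have h2 : (PySem.List.pyRange 0 (k : Int) 1).foldl (fun m _ => m ++ [[0]])
        ([] : List (List Int)) = createMatrixL (k : Int) := rfl
    rw [h2, ih, List.foldl_cons, List.foldl_nil, List.replicate_succ']

theorem pvCnt_succ (AB : List Int) (m : Nat) :
    pvCnt AB (m + 1) = pvCnt AB m + (if ((m : Int) + 1) ∈ AB then 1 else 0) := by
  rw [pvCnt, List.range_succ, List.filter_append, List.length_append, pvCnt]
  by_cases h : ((m : Int) + 1) ∈ AB <;> simp [h]

theorem pvSpec_succ (XB : List (List Int)) (AB : List Int) (m : Nat) :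
    pvSpec XB AB (m + 1) = pvSpec XB AB m ++
      [if ((m : Int) + 1) ∈ AB then [pvXbValA XB ((pvCnt AB m : Nat) : Int)] else [0]] := by
  rw [pvSpec, List.range_succ, List.map_append, pvSpec]
  rfl

theorem pvSpec_length (XB : List (List Int)) (AB : List Int) (m : Nat) :
    (pvSpec XB AB m).length = m := by simp [pvSpec]

theorem A_prefix (XB : List (List Int)) (AB : List Int) (ys : List Int)
    (c tl : List (List Int)) (t : Int) (h : ∀ y ∈ ys, y.toNat < c.length) :
    ys.foldl (fun st y => pvInnerA XB y AB st) (c ++ tl, t) =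
      ((ys.foldl (fun st y => pvInnerA XB y AB st) (c, t)).1 ++ tl,
       (ys.foldl (fun st y => pvInnerA XB y AB st) (c, t)).2) := by
  induction ys generalizing c t with
  | nil => simp
  | cons y ys ih =>
    rw [List.foldl_cons, List.foldl_cons,
      pvInnerA_append XB y AB c tl t (h y (List.mem_cons_self))]
    rw [ih _ _ (fun y' hy' => by
      rw [pvInnerA_length]; exact h y' (List.mem_cons_of_mem _ hy'))]

theorem A_state (XB : List (List Int)) (AB : List Int) (m : Nat) :
    (PySem.List.pyRange 0 (m : Int) 1).foldl (fun st y => pvInnerA XB y AB st)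
      (createMatrixL (m : Int), 0) = (pvSpec XB AB m, ((pvCnt AB m : Nat) : Int)) := by
  induction m with
  | zero => simp [PySem.List.pyRange_one_eq_nil le_rfl, createMatrixL, pvSpec, pvCnt]
  | succ k ih =>
    have h1 : ((k + 1 : Nat) : Int) = (k : Int) + 1 := by push_cast; ring
    have hcm : createMatrixL ((k : Int) + 1) = createMatrixL (k : Int) ++ [[0]] := by
      rw [← h1, createMatrixL_eq, createMatrixL_eq, List.replicate_succ']
    rw [h1, PySem.List.pyRange_one_succ_right (Int.natCast_nonneg k), hcm, List.foldl_append,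
      A_prefix XB AB _ _ _ _ (fun y hy => by
        rw [PySem.List.mem_pyRange_one] at hy
        rw [createMatrixL_eq, List.length_replicate]; omega),
      ih]
    rw [List.foldl_cons, List.foldl_nil]
    have hget : getElem? (pvSpec XB AB k ++ [[0]]) ((k : Int)).toNat = some [0] := by
      rw [Int.toNat_natCast, List.getElem?_append_right (pvSpec_length XB AB k).le]
      simp [pvSpec_length]
    rw [pvInnerA_spec XB (k : Int) AB _ _ hget, pvSpec_succ, pvCnt_succ]
    by_cases hmem : ((k : Int) + 1) ∈ AB
    · rw [if_pos hmem, if_pos hmem, if_pos hmem]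
      have hset : (pvSpec XB AB k ++ [[0]]).set ((k : Int)).toNat
            [pvXbValA XB ((pvCnt AB k : Nat) : Int)]
          = pvSpec XB AB k ++ [[pvXbValA XB ((pvCnt AB k : Nat) : Int)]] := by
        rw [Int.toNat_natCast, List.set_append_right _ _ (pvSpec_length XB AB k).le,
          pvSpec_length, Nat.sub_self]
        rfl
      rw [hset]
      simp only [Prod.mk.injEq]
      refine ⟨trivial, ?_⟩
      push_cast
      ring
    · rw [if_neg hmem, if_neg hmem, if_neg hmem]
      simp

-- ---- B side ----

theorem pvPos_length (AB : List Int) (m : Nat) : (pvPos AB m).length = pvCnt AB m := by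
  simp [pvPos, pvCnt]

theorem pvPos_mem (AB : List Int) (m : Nat) (a : Int) :
    a ∈ pvPos AB m ↔ a ∈ AB ∧ 1 ≤ a ∧ a ≤ (m : Int) := by
  simp only [pvPos, List.mem_map, List.mem_filter, List.mem_range, decide_eq_true_eq]
  constructor
  · rintro ⟨y, ⟨hy, hmem⟩, rfl⟩
    exact ⟨hmem, by omega, by omega⟩
  · rintro ⟨hmem, h1, h2⟩
    have hc : (((a - 1).toNat : Nat) : Int) + 1 = a := by omega
    exact ⟨(a - 1).toNat, ⟨by omega, by rw [hc]; exact hmem⟩, hc⟩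

theorem pvPos_pairwise (AB : List Int) (m : Nat) : (pvPos AB m).Pairwise (· < ·) := by
  rw [pvPos, List.pairwise_map]
  exact (List.pairwise_lt_range.filter _).imp (fun h => by omega)

theorem pvPos_succ (AB : List Int) (m : Nat) :
    pvPos AB (m + 1) = pvPos AB m ++
      (if ((m : Int) + 1) ∈ AB then [(m : Int) + 1] else []) := by
  rw [pvPos, List.range_succ, List.filter_append, List.map_append, pvPos]
  by_cases h : ((m : Int) + 1) ∈ AB <;> simp [h]

theorem positions_eq (AB : List Int) (m : Nat) :
    PySem.List.sorted
      ((PySem.Set.ofList AB).filter (fun p => decide (1 ≤ p) && decide (p ≤ (m : Int))))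
      (fun x => x) false = pvPos AB m := by
  refine PySem.List.sorted_eq_of_perm_of_pairwise_lt _ _ _ ?_ (pvPos_pairwise AB m)
  have h1 : (pvPos AB m).Nodup :=
    ((List.nodup_range).filter _).map (fun a b h => by omega)
  have h2 : ((PySem.Set.ofList AB).filter
      (fun p => decide (1 ≤ p) && decide (p ≤ (m : Int)))).Nodup :=
    (PySem.Set.nodup_ofList AB).filter _
  refine (List.perm_ext_iff_of_nodup h1 h2).mpr ?_
  intro a
  rw [pvPos_mem, List.mem_filter, PySem.Set.mem_ofList]
  simp only [Bool.and_eq_true, decide_eq_true_eq]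

theorem init_eq (m : Nat) :
    (PySem.List.pyRange 0 (m : Int) 1).map (fun _ => ([0] : List Int)) =
      List.replicate m [0] := by
  rw [List.eq_replicate_iff]
  constructor
  · rw [List.length_map, PySem.List.length_pyRange_one]; omega
  · intro b hb
    obtain ⟨x, _, rfl⟩ := List.mem_map.mp hb
    rfl

theorem B_prefix (XB : List (List Int)) (ips : List (Int × Int)) (c tl : List (List Int))
    (h : ∀ ip ∈ ips, (ip.2 - 1).toNat < c.length) :
    ips.foldl (fun res ip => pvSetRow0 res (ip.2 - 1).toNat (pvXbValB XB ip.1)) (c ++ tl) =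
      ips.foldl (fun res ip => pvSetRow0 res (ip.2 - 1).toNat (pvXbValB XB ip.1)) c ++ tl := by
  induction ips generalizing c with
  | nil => simp
  | cons ip ips ih =>
    rw [List.foldl_cons, List.foldl_cons, pvSetRow0_append _ _ _ _ (h ip List.mem_cons_self)]
    exact ih _ (fun ip' hip' => by
      rw [pvSetRow0_length]; exact h ip' (List.mem_cons_of_mem _ hip'))

theorem B_state (XB : List (List Int)) (AB : List Int) (m : Nat) :
    (PySem.List.enumerate (pvPos AB m) 0).foldl
      (fun res ip => pvSetRow0 res (ip.2 - 1).toNat (pvXbValB XB ip.1))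
      (List.replicate m [0]) = pvSpec XB AB m := by
  induction m with
  | zero => simp [pvPos, pvSpec, PySem.List.enumerate_nil]
  | succ k ih =>
    rw [pvPos_succ, PySem.List.enumerate_append, List.foldl_append, List.replicate_succ',
      B_prefix XB _ _ _ (fun ip hip => by
        obtain ⟨j, hj, rfl⟩ := (PySem.List.mem_enumerate_iff _ _ _).mp hip
        have hb := (pvPos_mem AB k _).mp (List.getElem_mem hj)
        show (((pvPos AB k)[j] : Int) - 1).toNat < (List.replicate k ([0] : List Int)).length
        rw [List.length_replicate]
        omega),
      ih]
    rw [pvSpec_succ]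
    by_cases hmem : ((k : Int) + 1) ∈ AB
    · rw [if_pos hmem, if_pos hmem,
        PySem.List.enumerate_cons, PySem.List.enumerate_nil,
        List.foldl_cons, List.foldl_nil,
        show (0 : Int) + ((pvPos AB k).length : Int) = ((pvCnt AB k : Nat) : Int) by
          rw [pvPos_length]; exact zero_add _,
        show ((k : Int) + 1 - 1).toNat = k by omega]
      have hlast := pvSetRow0_last (pvSpec XB AB k)
        (pvXbValB XB ((pvCnt AB k : Nat) : Int))
      rw [pvSpec_length] at hlast
      rw [hlast, pvXbVal_eq]
    · rw [if_neg hmem, if_neg hmem, PySem.List.enumerate_nil, List.foldl_nil]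

theorem scatter_nil (XB : List (List Int)) (ips : List (Int × Int)) :
    ips.foldl (fun res ip => pvSetRow0 res (ip.2 - 1).toNat (pvXbValB XB ip.1)) [] = [] := by
  induction ips with
  | nil => rfl
  | cons ip ips ih => simpa [pvSetRow0] using ih

-- ===== VERDICT (by name: the statement is the Claim_ definition above) =====
theorem buildingInitialVectorX_spec : Claim_equal_buildingInitialVectorX := by
  intro n XB AB _ _
  rw [Spec_buildingInitialVectorX]
  simp only [buildingInitialVectorX, buildingInitialVectorX_alt]
  by_cases hn : n ≤ 0
  · rw [PySem.List.pyRange_one_eq_nil hn]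
    simp only [List.map_nil, List.foldl_nil]
    rw [createMatrixL, PySem.List.pyRange_one_eq_nil hn, List.foldl_nil, scatter_nil]
  · have hm : n = ((n.toNat : Nat) : Int) := by omega
    rw [hm, A_state, init_eq, positions_eq, B_state]
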